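-- pv_equiv track=rewrite | github.com/ternaustralia/ontotools | ontotools/functions/normalize.py | get_topbraid_metadata
-- ===== SOURCE A (Python) =====
-- def get_topbraid_metadata(content: str) -> str:
--     """Get the TopBraid Composer metadata at the top of an ontology file."""
--     lines = content.split("\n")
--     comments = []
--     for line in lines:
--         if line.startswith("#"):
--             comments.append(line)
--         else:
--             break
--
--     if comments:
--         return "\n".join(comments) + "\n"
--     else:
--         return ""
-- ===== SOURCE B (Python) =====
-- def get_topbraid_metadata(content: str) -> str:
--     """Get the TopBraid Composer metadata at the top of an ontology file."""
--     pos = 0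
--     n = len(content)
--     while pos < n and content[pos] == "#":
--         nl = content.find("\n", pos)
--         if nl == -1:
--             return content + "\n"
--         pos = nl + 1
--     return content[:pos]
-- ===== Notes on version B (the rewrite author's own statement) =====
-- stated objective: alternative
-- what changed: Instead of splitting the whole content into a list of lines and looping with a break, B scans only the leading comment block with an index cursor and str.find, returning the matching prefix slice (plus a final newline when the block is unterminated).
import Mathlib
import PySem

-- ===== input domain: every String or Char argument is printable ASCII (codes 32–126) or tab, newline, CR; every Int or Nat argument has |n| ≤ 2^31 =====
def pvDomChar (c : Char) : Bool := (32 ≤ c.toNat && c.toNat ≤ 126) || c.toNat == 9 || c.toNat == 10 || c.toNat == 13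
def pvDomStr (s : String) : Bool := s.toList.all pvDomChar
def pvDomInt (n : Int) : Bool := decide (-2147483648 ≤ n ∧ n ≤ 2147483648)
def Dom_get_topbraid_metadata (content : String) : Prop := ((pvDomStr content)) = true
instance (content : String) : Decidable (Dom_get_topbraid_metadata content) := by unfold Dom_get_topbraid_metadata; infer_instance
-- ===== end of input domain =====

-- B replaces split-all-lines-then-loop by a cursor scan of only the leading comment
-- block (objective: alternative). Equivalence of the RETURN value is proved for all inputs.

-- ===== PORT A =====
-- the for-loop with break: collect lines while they start with '#'
def aCollect : List String → List String
  | [] => []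
  | l :: ls => if PySem.Str.startswith l "#" then l :: aCollect ls else []

def get_topbraid_metadata (content : String) : String :=
  let lines := (PySem.Chars.splitOn content.toList ['\n']).map String.ofList  -- content.split("\n")
  let comments := aCollect lines
  if comments = [] then "" else PySem.Str.join "\n" comments ++ "\n"

-- ===== PORT B =====
-- one step of B's `content.find("\n", pos)` cursor advance: split off the first line
-- including its '\n' (none = no '\n' remains, B's `nl == -1` branch)
def bSplitNl : List Char → Option (List Char × List Char)
  | [] => none
  | c :: cs =>
    if c = '\n' then some ([c], cs)
    else match bSplitNl cs with
      | none => none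
      | some (l, r) => some (c :: l, r)

theorem bSplitNl_some_len : ∀ (cs l r : List Char), bSplitNl cs = some (l, r) → r.length < cs.length := by
  intro cs
  induction cs with
  | nil => intro l r h; simp [bSplitNl] at h
  | cons c cs ih =>
    intro l r h
    simp only [bSplitNl] at h
    split at h
    · simp at h
      rw [← h.2]
      simp
    · cases hx : bSplitNl cs with
      | none => rw [hx] at h; simp at h
      | some p =>
        rw [hx] at h
        cases p with
        | mk l' r' =>
          simp at h
          have hlt := ih l' r' hx
          rw [← h.2]
          simp
          omega

-- B's while loop: while the cursor sits on '#', consume one full line; the consumed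
-- prefix is the result (with '\n' appended when the last line had none)
def bLoop : List Char → List Char
  | [] => []
  | c :: cs =>
    if c = '#' then
      match h : bSplitNl (c :: cs) with
      | none => (c :: cs) ++ ['\n']
      | some (l, r) => l ++ bLoop r
    else []
termination_by cs => cs.length
decreasing_by exact bSplitNl_some_len _ _ _ h

def get_topbraid_metadata_alt (content : String) : String :=
  String.ofList (bLoop content.toList)

-- ===== PRECONDITION & SPEC =====
def Spec_get_topbraid_metadata (content : String) (out : String) : Prop := out = get_topbraid_metadata_alt content
instance (content : String) (out : String) : Decidable (Spec_get_topbraid_metadata content out) := by unfold Spec_get_topbraid_metadata; infer_instance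

-- ===== CLAIM (what is proved, stated in full; the proofs are below) =====
def Claim_equal_get_topbraid_metadata : Prop := ∀ (content : String), Dom_get_topbraid_metadata content → Spec_get_topbraid_metadata content (get_topbraid_metadata content)

-- ===== LEMMAS AND PROOFS =====

theorem go_spec : ∀ (fuel : Nat) (l cur : List Char) (acc : List (List Char)), l.length ≤ fuel →
    PySem.Chars.splitOn.go ['\n'] fuel l cur acc =
      acc.reverse ++ (l.splitOnP (· == '\n')).modifyHead (cur.reverse ++ ·) := by
  intro fuel
  induction fuel with
  | zero =>
    intro l cur acc h
    have : l = [] := List.eq_nil_of_length_eq_zero (by omega)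
    subst this
    rw [PySem.Chars.splitOn.go.eq_1]
    simp [List.splitOnP_nil]
  | succ fuel ih =>
    intro l cur acc h
    cases l with
    | nil =>
      rw [PySem.Chars.splitOn.go.eq_2 _ _ _ _ (by omega)]
      simp [List.splitOnP_nil]
    | cons c rest =>
      rw [PySem.Chars.splitOn.go.eq_3]
      by_cases hc : c = '\n'
      · subst hc
        have hpre : List.isPrefixOf ['\n'] ('\n' :: rest) = true := by
          simp [List.isPrefixOf]
        rw [if_pos hpre]
        simp only [List.length_cons, List.length_nil, List.drop_succ_cons, List.drop_zero]
        rw [ih rest [] ((cur.reverse) :: acc) (by simp at h ⊢; omega)]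
        obtain ⟨s, ss, hs⟩ := List.exists_cons_of_ne_nil (List.splitOnP_ne_nil (· == '\n') rest)
        simp [List.splitOnP_cons, hs]
      · have hpre : List.isPrefixOf ['\n'] (c :: rest) = false := by
          simp [List.isPrefixOf]; exact fun hx => absurd hx.symm hc
        rw [if_neg (by simp [hpre])]
        rw [ih rest (c :: cur) acc (by simp at h ⊢; omega)]
        obtain ⟨s, ss, hs⟩ := List.exists_cons_of_ne_nil (List.splitOnP_ne_nil (· == '\n') rest)
        simp [List.splitOnP_cons, hs, hc]

theorem splitOn_newline (cs : List Char) :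
    PySem.Chars.splitOn cs ['\n'] = cs.splitOnP (· == '\n') := by
  rw [PySem.Chars.splitOn, go_spec (cs.length + 1) cs [] [] (by omega)]
  obtain ⟨s, ss, hs⟩ := List.exists_cons_of_ne_nil (List.splitOnP_ne_nil (· == '\n') cs)
  simp [hs]

-- splitOnP on a list without the separator
theorem splitOnP_no_sep : ∀ (cs : List Char), '\n' ∉ cs → cs.splitOnP (· == '\n') = [cs] := by
  intro cs
  induction cs with
  | nil => intro _; simp [List.splitOnP_nil]
  | cons c rest ih =>
    intro h
    have hc : (c == '\n') = false := by simp; intro hx; exact h (by simp [hx])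
    rw [List.splitOnP_cons, if_neg (by simp [hc])]
    rw [ih (fun hx => h (by simp [hx]))]
    simp [List.modifyHead]

theorem splitOnP_seg_append : ∀ (seg : List Char), '\n' ∉ seg → ∀ (r : List Char),
    (seg ++ '\n' :: r).splitOnP (· == '\n') = seg :: r.splitOnP (· == '\n') := by
  intro seg
  induction seg with
  | nil => intro _ r; simp [List.splitOnP_cons]
  | cons c rest ih =>
    intro h r
    have hc : (c == '\n') = false := by simp; intro hx; exact h (by simp [hx])
    rw [List.cons_append, List.splitOnP_cons, if_neg (by simp [hc])]
    rw [ih (fun hx => h (by simp [hx])) r]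
    simp

theorem bSplitNl_spec : ∀ (cs : List Char),
    (bSplitNl cs = none → '\n' ∉ cs) ∧
    (∀ l r, bSplitNl cs = some (l, r) → ∃ seg, '\n' ∉ seg ∧ l = seg ++ ['\n'] ∧ cs = seg ++ '\n' :: r) := by
  intro cs
  induction cs with
  | nil => constructor
           · intro _; simp
           · intro l r h; simp [bSplitNl] at h
  | cons c rest ih =>
    by_cases hc : c = '\n'
    · subst hc
      constructor
      · intro h; simp [bSplitNl] at h
      · intro l r h
        simp [bSplitNl] at h
        exact ⟨[], by simp, by simp [← h.1], by simp [h.2]⟩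
    · constructor
      · intro h
        simp only [bSplitNl, if_neg hc] at h
        cases hx : bSplitNl rest with
        | none =>
          intro hm
          rcases List.mem_cons.mp hm with h1 | h2
          · exact hc h1.symm
          · exact (ih.1 hx) h2
        | some p => rw [hx] at h; cases p; simp at h
      · intro l r h
        simp only [bSplitNl, if_neg hc] at h
        cases hx : bSplitNl rest with
        | none => rw [hx] at h; simp at h
        | some p =>
          rw [hx] at h
          cases p with
          | mk l' r' =>
            simp at h
            obtain ⟨seg, hseg, hl, hrest⟩ := ih.2 l' r' hx
            refine ⟨c :: seg, ?_, ?_, ?_⟩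
            · intro hm
              rcases List.mem_cons.mp hm with h1 | h2
              · exact hc h1.symm
              · exact hseg h2
            · simp [← h.1, hl]
            · simp [hrest, h.2]

-- the char-level value of A's computation
def charRes (cs : List Char) : List Char :=
  let segs := (cs.splitOnP (· == '\n')).takeWhile (fun seg => PySem.Chars.startswith seg ['#'])
  if segs = [] then [] else PySem.Chars.join ['\n'] segs ++ ['\n']

theorem startswith_hash_nil : PySem.Chars.startswith [] ['#'] = false := by decide

theorem startswith_hash_cons (c : Char) (cs : List Char) :
    PySem.Chars.startswith (c :: cs) ['#'] = (c == '#') := by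
  simp [PySem.Chars.startswith, List.isPrefixOf]
  exact eq_comm

theorem charRes_eq_bLoop : ∀ (n : Nat) (cs : List Char), cs.length ≤ n → charRes cs = bLoop cs := by
  intro n
  induction n with
  | zero =>
    intro cs h
    have : cs = [] := List.eq_nil_of_length_eq_zero (by omega)
    subst this
    simp [charRes, bLoop, List.splitOnP_nil, startswith_hash_nil]
  | succ n ih =>
    intro cs hlen
    cases cs with
    | nil => simp [charRes, bLoop, List.splitOnP_nil, startswith_hash_nil]
    | cons c rest =>
      by_cases hc : c = '#'
      · subst hc
        rw [bLoop, if_pos rfl]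
        cases hx : bSplitNl ('#' :: rest) with
        | none =>
          have hnot : '\n' ∉ '#' :: rest := (bSplitNl_spec _).1 hx
          simp only [charRes, splitOnP_no_sep _ hnot]
          rw [List.takeWhile_cons]
          simp [startswith_hash_cons, PySem.Chars.join, List.intercalate, List.intersperse]
        | some p =>
          cases p with
          | mk l r =>
            obtain ⟨seg, hseg, hl, hcs⟩ := (bSplitNl_spec _).2 l r hx
            -- seg is nonempty and starts with '#'
            cases seg with
            | nil => simp at hcs
            | cons s0 stail =>
              have hs0 : s0 = '#' := by
                have := hcs
                simp at this
                exact this.1.symm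
              subst hs0
              have hrest : rest = stail ++ '\n' :: r := by simpa using hcs
              have hsplit : (('#' :: rest).splitOnP (· == '\n')) =
                  ('#' :: stail) :: r.splitOnP (· == '\n') := by
                rw [show ('#' :: rest) = ('#' :: stail) ++ '\n' :: r by simp [hrest]]
                exact splitOnP_seg_append _ hseg r
              have hIH : charRes r = bLoop r := by
                apply ih
                have := bSplitNl_some_len _ _ _ hx
                simp at this hlen ⊢
                omega
              simp only [charRes, hsplit, List.takeWhile_cons, startswith_hash_cons]
              simp only [beq_self_eq_true, if_true]
              by_cases ht : (r.splitOnP (· == '\n')).takeWhile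
                  (fun seg => PySem.Chars.startswith seg ['#']) = []
              · -- comment block ends right after this line
                rw [ht]
                have hB : bLoop r = [] := by
                  rw [← hIH]; simp [charRes, ht]
                simp [hB, hl, PySem.Chars.join, List.intercalate, List.intersperse]
              · obtain ⟨t0, ts, hts⟩ := List.exists_cons_of_ne_nil ht
                rw [hts]
                have hB : bLoop r = PySem.Chars.join ['\n'] (t0 :: ts) ++ ['\n'] := by
                  rw [← hIH]; simp [charRes, hts]
                have hjoin : PySem.Chars.join ['\n'] (('#' :: stail) :: t0 :: ts) =
                    ('#' :: stail) ++ '\n' :: PySem.Chars.join ['\n'] (t0 :: ts) := by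
                  simp [PySem.Chars.join, List.intercalate, List.intersperse]
                simp only [hjoin, hB, hl]
                simp
      · -- first line does not start with '#': both sides empty
        rw [bLoop, if_neg hc]
        simp only [charRes, List.splitOnP_cons]
        by_cases hnl : c = '\n'
        · simp [hnl, List.takeWhile_cons, startswith_hash_nil]
        · obtain ⟨s, ss, hs⟩ := List.exists_cons_of_ne_nil (List.splitOnP_ne_nil (· == '\n') rest)
          simp [hnl, hs, List.takeWhile_cons, startswith_hash_cons, hc]

theorem aCollect_map : ∀ (segs : List (List Char)),
    aCollect (segs.map String.ofList) =
      (segs.takeWhile (fun seg => PySem.Chars.startswith seg ['#'])).map String.ofList := by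
  intro segs
  induction segs with
  | nil => simp [aCollect]
  | cons s ss ih =>
    simp only [List.map_cons, aCollect, List.takeWhile_cons]
    have : PySem.Str.startswith (String.ofList s) "#" = PySem.Chars.startswith s ['#'] := by
      simp [PySem.Str.startswith]
    rw [this]
    by_cases h : PySem.Chars.startswith s ['#'] = true
    · simp [h, ih]
    · simp only [Bool.not_eq_true] at h
      simp [h]

theorem get_topbraid_toList (content : String) :
    (get_topbraid_metadata content).toList = charRes content.toList := by
  simp only [get_topbraid_metadata, charRes, splitOn_newline, aCollect_map]
  by_cases h : (content.toList.splitOnP (· == '\n')).takeWhile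
      (fun seg => PySem.Chars.startswith seg ['#']) = []
  · simp [h]
  · rw [if_neg (by simpa using h), if_neg h]
    rw [String.toList_append, PySem.Str.toList_join]
    simp [Function.comp_def]

-- ===== VERDICT (by name: the statement is the Claim_ definition above) =====
theorem get_topbraid_metadata_spec : Claim_equal_get_topbraid_metadata := by
  intro content _
  unfold Spec_get_topbraid_metadata get_topbraid_metadata_alt
  have h1 := get_topbraid_toList content
  rw [charRes_eq_bLoop content.toList.length content.toList le_rfl] at h1
  have : (get_topbraid_metadata content).toList = (String.ofList (bLoop content.toList)).toList := by
    simpa using h1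
  exact String.toList_injective this
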